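-- pv_equiv track=rewrite | github.com/Reynel-12/random_forest---ProyectoCD2 | random_forest.py | calcular_lead_time_real
-- ===== SOURCE A (Python) =====
-- def calcular_lead_time_real(dias_str):
--     # Diccionario para convertir nombres a número de día
--     mapa_dias = {
--         'lunes': 0, 'martes': 1, 'miercoles': 2, 'jueves': 3,
--         'viernes': 4, 'sabado': 5, 'domingo': 6
--     }
--
--     # Limpiar y convertir a lista de números (ej: [0, 1] para lunes, martes)
--     dias = [mapa_dias[d.strip().lower()] for d in str(dias_str).split(',') if d.strip().lower() in mapa_dias]
--
--     if not dias:
--         return 7  # Si no hay datos, asumimos una semana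
--
--     dias.sort()
--
--     # Calcular los huecos entre días (incluyendo el salto del domingo al lunes)
--     huecos = []
--     for i in range(len(dias)):
--         if i < len(dias) - 1:
--             huecos.append(dias[i+1] - dias[i])
--         else:
--             # Hueco desde el último día de la semana hasta el primero de la siguiente
--             huecos.append(7 - dias[i] + dias[0])
--
--     # RETORNAMOS EL HUECO MÁS LARGO
--     # Porque el stock debe ser suficiente para sobrevivir el intervalo más largo sin camión.
--     return max(huecos)
-- ===== SOURCE B (Python) =====
-- def calcular_lead_time_real(dias_str):
--     mapa_dias = {
--         'lunes': 0, 'martes': 1, 'miercoles': 2, 'jueves': 3,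
--         'viernes': 4, 'sabado': 5, 'domingo': 6
--     }
--     # Presence array: which weekdays occur (duplicates collapse for free)
--     present = [False] * 7
--     for d in str(dias_str).split(','):
--         key = d.strip().lower()
--         if key in mapa_dias:
--             present[mapa_dias[key]] = True
--     if True not in present:
--         return 7
--     # Circular scan from the first present day: max distance between consecutive present days
--     first = present.index(True)
--     best = 0
--     prev = first
--     for i in range(first + 1, first + 8):
--         if present[i % 7]:
--             best = max(best, i - prev)
--             prev = i
--     return best
-- ===== Notes on version B (the rewrite author's own statement) =====
-- stated objective: alternative
-- what changed: B replaces A's sort of the parsed day list and its index-driven gap-list construction by a 7-slot boolean presence array filled in one pass over the split string, followed by a fixed 8-step circular scan of the week that tracks the running maximum distance between consecutive present days.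
import Mathlib
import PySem

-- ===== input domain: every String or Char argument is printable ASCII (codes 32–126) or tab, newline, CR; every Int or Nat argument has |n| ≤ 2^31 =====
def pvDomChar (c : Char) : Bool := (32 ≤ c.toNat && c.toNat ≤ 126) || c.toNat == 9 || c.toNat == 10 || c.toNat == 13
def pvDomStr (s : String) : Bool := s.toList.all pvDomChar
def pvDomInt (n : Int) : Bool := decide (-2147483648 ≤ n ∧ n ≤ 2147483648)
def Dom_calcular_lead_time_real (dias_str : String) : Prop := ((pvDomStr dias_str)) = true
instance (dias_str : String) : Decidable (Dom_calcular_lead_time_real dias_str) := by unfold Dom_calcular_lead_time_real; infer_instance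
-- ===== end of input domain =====

-- B replaces A's sort-and-diff over the parsed day list by a 7-slot presence array built in
-- one pass over the split string, then a fixed circular scan of the week for the largest gap
-- (objective: alternative algorithm — no sort, no gap list).

-- shared constant table (the literal dict both Pythons carry)
def mapaDias : PySem.Dict String Int :=
  PySem.Dict.ofList [("lunes", 0), ("martes", 1), ("miercoles", 2), ("jueves", 3),
                     ("viernes", 4), ("sabado", 5), ("domingo", 6)]

-- ===== PORT A =====
def calcular_lead_time_real (dias_str : String) : Int :=
  -- dias = [mapa_dias[d.strip().lower()] for d in str(dias_str).split(',') if … in mapa_dias]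
  let dias : List Int :=
    ((PySem.Str.split? dias_str ",").getD []).filterMap
      (fun d => PySem.Dict.get? mapaDias (PySem.Str.lower (PySem.Str.strip d)))
  if dias = [] then 7
  else
    let diasS := PySem.List.sorted dias (fun x => x) false
    let n : Int := PySem.List.len diasS
    let huecos : List Int :=
      (PySem.List.pyRange 0 n 1).foldl
        (fun huecos i =>
          if i < n - 1 then
            huecos ++ [PySem.List.pyGetD diasS (i + 1) 0 - PySem.List.pyGetD diasS i 0]
          else
            huecos ++ [7 - PySem.List.pyGetD diasS i 0 + PySem.List.pyGetD diasS 0 0]) []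
    (PySem.List.max? huecos (fun x => x)).getD 0

-- ===== PORT B =====
def calcular_lead_time_real_alt (dias_str : String) : Int :=
  -- presence array of the 7 weekdays, built in one pass over the split string
  let present : List Bool :=
    ((PySem.Str.split? dias_str ",").getD []).foldl
      (fun p d =>
        match PySem.Dict.get? mapaDias (PySem.Str.lower (PySem.Str.strip d)) with
        | some v => PySem.List.pySetD p v true
        | none => p)
      (List.replicate 7 false)
  if present.contains true = false then 7
  else
    -- circular scan from the first present day
    let first : Int := ((PySem.List.index? present true).getD 0 : Nat)
    let res : Int × Int :=
      (PySem.List.pyRange (first + 1) (first + 8) 1).foldl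
        (fun st i =>
          if PySem.List.pyGetD present (PySem.Int.mod i 7) false then
            (max st.1 (i - st.2), i)
          else st)
        (0, first)
    res.1

-- ===== PRECONDITION & SPEC =====
def Spec_calcular_lead_time_real (dias_str : String) (out : Int) : Prop := out = calcular_lead_time_real_alt dias_str
instance (dias_str : String) (out : Int) : Decidable (Spec_calcular_lead_time_real dias_str out) := by unfold Spec_calcular_lead_time_real; infer_instance

-- ===== CLAIM (what is proved, stated in full; the proofs are below) =====
def Claim_equal_calcular_lead_time_real : Prop := ∀ (dias_str : String), Dom_calcular_lead_time_real dias_str → Spec_calcular_lead_time_real dias_str (calcular_lead_time_real dias_str)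

-- ===== LEMMAS AND PROOFS =====

-- the parsed list of day numbers (A's `dias`), abstracted for the proof
def pvParse (dias_str : String) : List Int :=
  ((PySem.Str.split? dias_str ",").getD []).filterMap
    (fun d => PySem.Dict.get? mapaDias (PySem.Str.lower (PySem.Str.strip d)))

theorem pvParse_range (dias_str : String) : ∀ x ∈ pvParse dias_str, 0 ≤ x ∧ x < 7 := by
  intro x hx
  simp only [pvParse, List.mem_filterMap] at hx
  obtain ⟨d, _, hd⟩ := hx
  have := PySem.Dict.mem_items_of_get?_eq_some mapaDias hd
  have hitems : mapaDias.items = [("lunes", 0), ("martes", 1), ("miercoles", 2), ("jueves", 3),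
      ("viernes", 4), ("sabado", 5), ("domingo", 6)] := by decide
  rw [hitems] at this
  simp only [List.mem_cons, List.not_mem_nil, or_false, Prod.mk.injEq] at this
  rcases this with ⟨_, h⟩|⟨_, h⟩|⟨_, h⟩|⟨_, h⟩|⟨_, h⟩|⟨_, h⟩|⟨_, h⟩ <;> omega

-- B's presence array as a fold over the parsed list
def pvMask (S : List Int) : List Bool :=
  S.foldl (fun p v => PySem.List.pySetD p v true) (List.replicate 7 false)

theorem pvMask_eq_aux (parts : List String) (p : List Bool) :
    parts.foldl
      (fun p d =>
        match PySem.Dict.get? mapaDias (PySem.Str.lower (PySem.Str.strip d)) with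
        | some v => PySem.List.pySetD p v true
        | none => p) p =
    (parts.filterMap
      (fun d => PySem.Dict.get? mapaDias (PySem.Str.lower (PySem.Str.strip d)))).foldl
      (fun p v => PySem.List.pySetD p v true) p := by
  induction parts generalizing p with
  | nil => rfl
  | cons d rest ih =>
    simp only [List.foldl_cons, List.filterMap_cons]
    cases h : PySem.Dict.get? mapaDias (PySem.Str.lower (PySem.Str.strip d)) with
    | some v => exact ih _
    | none => exact ih _

theorem pvMask_eq (dias_str : String) :
    ((PySem.Str.split? dias_str ",").getD []).foldl
      (fun p d =>
        match PySem.Dict.get? mapaDias (PySem.Str.lower (PySem.Str.strip d)) with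
        | some v => PySem.List.pySetD p v true
        | none => p)
      (List.replicate 7 false) = pvMask (pvParse dias_str) := by
  rw [pvMask, pvParse, pvMask_eq_aux]

theorem pvMask_foldl_length (S : List Int) (p : List Bool) :
    (S.foldl (fun p v => PySem.List.pySetD p v true) p).length = p.length := by
  induction S generalizing p with
  | nil => rfl
  | cons v rest ih => simp only [List.foldl_cons, ih, PySem.List.length_pySetD]

theorem pvMask_length (S : List Int) : (pvMask S).length = 7 := by
  simp [pvMask, pvMask_foldl_length]

theorem pvMask_foldl_getD (S : List Int) (p : List Bool) (hp : p.length = 7)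
    (hS : ∀ x ∈ S, 0 ≤ x ∧ x < 7) (i : Nat) (hi : i < 7) :
    (S.foldl (fun p v => PySem.List.pySetD p v true) p).getD i false
      = (p.getD i false || decide ((i : Int) ∈ S)) := by
  induction S generalizing p with
  | nil => simp
  | cons v rest ih =>
    have hv := hS v (by simp)
    simp only [List.foldl_cons]
    rw [ih _ (by simp [PySem.List.length_pySetD, hp]) (fun x hx => hS x (by simp [hx]))]
    rw [PySem.List.pySetD_of_nonneg p true hv.1]
    rcases eq_or_ne (i : Int) v with h | h
    · have hiv : i = v.toNat := by omega
      subst hiv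
      simp only [List.getD, List.getElem?_set_self (by omega : v.toNat < p.length)]
      simp [h]
    · have hne : v.toNat ≠ i := by omega
      simp [List.getD, List.getElem?_set_ne hne, h]

theorem pvMask_getD (S : List Int) (hS : ∀ x ∈ S, 0 ≤ x ∧ x < 7) (i : Nat) (hi : i < 7) :
    (pvMask S).getD i false = decide ((i : Int) ∈ S) := by
  rw [pvMask, pvMask_foldl_getD S _ (by simp) hS i hi]
  have : (List.replicate 7 false).getD i false = false := by interval_cases i <;> rfl
  rw [this]; simp

-- A's gap list, written structurally (first = dias[0], prev = previous day)
def hueList (first : Int) (prev : Int) : List Int → List Int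
  | [] => [7 - prev + first]
  | b :: t => (b - prev) :: hueList first b t

-- A's maximum gap, written structurally
def mgap (first : Int) (prev : Int) : List Int → Int
  | [] => 7 - prev + first
  | b :: t => max (b - prev) (mgap first b t)

-- sorted list with adjacent duplicates removed
def dedupAdj (prev : Int) : List Int → List Int
  | [] => []
  | b :: t => if b = prev then dedupAdj prev t else b :: dedupAdj b t

-- the strictly increasing list of days a presence mask holds
def daysOf (m : List Bool) : List Int :=
  (List.range 7).filterMap (fun i => if m.getD i false then some (i : Int) else none)

theorem hueList_eq (t : List Int) (a first : Int) :
    (List.range (a :: t).length).map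
      (fun (k : Nat) => if (k : Int) < ((a :: t).length : Int) - 1
        then (a :: t).getD (k + 1) 0 - (a :: t).getD k 0
        else 7 - (a :: t).getD k 0 + first) = hueList first a t := by
  induction t generalizing a with
  | nil => simp [hueList]
  | cons b u ih =>
    have hlen : (a :: b :: u).length = (b :: u).length + 1 := rfl
    rw [hlen, List.range_succ_eq_map, List.map_cons, List.map_map, hueList]
    refine congrArg₂ _ ?_ ?_
    · have hpos : (((0 : Nat)) : Int) < (((b :: u).length + 1 : Nat) : Int) - 1 := by
        simp only [List.length_cons]; push_cast; omega
      rw [if_pos hpos]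
      rfl
    · rw [← ih b]
      refine List.map_congr_left (fun k hk => ?_)
      simp only [Function.comp_apply, List.mem_range] at hk ⊢
      have hcond : ((Nat.succ k : Nat) : Int) < (((b :: u).length + 1 : Nat) : Int) - 1
          ↔ ((k : Nat) : Int) < ((b :: u).length : Int) - 1 := by
        simp only [List.length_cons]; push_cast; omega
      by_cases hc : ((k : Nat) : Int) < ((b :: u).length : Int) - 1
      · rw [if_pos (hcond.mpr hc), if_pos hc]
        rfl
      · rw [if_neg (fun h => hc (hcond.mp h)), if_neg hc]
        rfl

theorem mgap_foldl (t : List Int) (first a init : Int) :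
    List.foldl max init (hueList first a t) = max init (mgap first a t) := by
  induction t generalizing a init with
  | nil => simp [hueList, mgap]
  | cons b u ih => simp [hueList, mgap, List.foldl_cons, ih, max_assoc]

theorem mgap_pos (t : List Int) (first prev : Int) (hf : 0 ≤ first) (hp : prev ≤ 6)
    (ht : ∀ x ∈ t, x ≤ 6) : 1 ≤ mgap first prev t := by
  induction t generalizing prev with
  | nil => simp only [mgap]; omega
  | cons b u ih =>
    have hb : b ≤ 6 := ht b (by simp)
    have h := ih b hb (fun x hx => ht x (by simp [hx]))
    have := le_max_right (b - prev) (mgap first b u)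
    simp only [mgap]; omega

theorem mgap_dedup (t : List Int) (first prev : Int) (hf : 0 ≤ first) (hp : prev ≤ 6)
    (ht : ∀ x ∈ t, x ≤ 6) : mgap first prev t = mgap first prev (dedupAdj prev t) := by
  induction t generalizing prev with
  | nil => rfl
  | cons b u ih =>
    have hb : b ≤ 6 := ht b (by simp)
    have htu : ∀ x ∈ u, x ≤ 6 := fun x hx => ht x (by simp [hx])
    by_cases hbp : b = prev
    · subst hbp
      have h1 : 1 ≤ mgap first b u := mgap_pos u first b hf hb htu
      rw [show dedupAdj b (b :: u) = dedupAdj b u from if_pos rfl,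
          show mgap first b (b :: u) = max (b - b) (mgap first b u) from rfl]
      rw [show b - b = (0 : Int) by omega, max_eq_right (by omega)]
      exact ih b hb htu
    · simp only [mgap, dedupAdj, if_neg hbp]
      rw [ih b hb htu]

theorem mem_dedupAdj_subset (t : List Int) (prev x : Int) (h : x ∈ dedupAdj prev t) : x ∈ t := by
  induction t generalizing prev with
  | nil => simp [dedupAdj] at h
  | cons b u ih =>
    simp only [dedupAdj] at h
    by_cases hbp : b = prev
    · rw [if_pos hbp] at h
      exact List.mem_cons_of_mem _ (ih prev h)
    · rw [if_neg hbp] at h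
      rcases List.mem_cons.mp h with h | h
      · simp [h]
      · exact List.mem_cons_of_mem _ (ih b h)

theorem mem_dedupAdj (t : List Int) (prev : Int) (hs : t.Pairwise (· ≤ ·))
    (hlo : ∀ y ∈ t, prev ≤ y) (x : Int) : x ∈ dedupAdj prev t ↔ x ∈ t ∧ x ≠ prev := by
  induction t generalizing prev with
  | nil => simp [dedupAdj]
  | cons b u ih =>
    rcases List.pairwise_cons.mp hs with ⟨hbu, hu⟩
    by_cases hbp : b = prev
    · subst hbp
      rw [show dedupAdj b (b :: u) = dedupAdj b u from if_pos rfl]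
      rw [ih b hu hbu]
      constructor
      · rintro ⟨h1, h2⟩; exact ⟨List.mem_cons_of_mem _ h1, h2⟩
      · rintro ⟨h1, h2⟩
        exact ⟨(List.mem_cons.mp h1).resolve_left h2, h2⟩
    · have hpb : prev < b := lt_of_le_of_ne (hlo b (by simp)) (fun h => hbp h.symm)
      rw [show dedupAdj prev (b :: u) = b :: dedupAdj b u from if_neg hbp]
      rw [List.mem_cons, List.mem_cons, ih b hu hbu]
      constructor
      · rintro (rfl | ⟨h1, h2⟩)
        · exact ⟨Or.inl rfl, by omega⟩
        · have := hbu x h1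
          exact ⟨Or.inr h1, by omega⟩
      · rintro ⟨rfl | h1, h2⟩
        · exact Or.inl rfl
        · by_cases hxb : x = b
          · exact Or.inl hxb
          · exact Or.inr ⟨h1, hxb⟩

theorem chain_dedupAdj (t : List Int) (prev : Int) (hs : t.Pairwise (· ≤ ·))
    (hlo : ∀ y ∈ t, prev ≤ y) : (prev :: dedupAdj prev t).Pairwise (· < ·) := by
  induction t generalizing prev with
  | nil => simp [dedupAdj]
  | cons b u ih =>
    rcases List.pairwise_cons.mp hs with ⟨hbu, hu⟩
    by_cases hbp : b = prev
    · subst hbp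
      rw [show dedupAdj b (b :: u) = dedupAdj b u from if_pos rfl]
      exact ih b hu hbu
    · have hpb : prev < b := lt_of_le_of_ne (hlo b (by simp)) (fun h => hbp h.symm)
      rw [show dedupAdj prev (b :: u) = b :: dedupAdj b u from if_neg hbp]
      have htail := ih b hu hbu
      refine List.pairwise_cons.mpr ⟨?_, htail⟩
      intro y hy
      rcases List.mem_cons.mp hy with rfl | hy
      · exact hpb
      · have := hbu y (mem_dedupAdj_subset u b y hy)
        omega

theorem daysOf_eq_map_filter (m : List Bool) :
    daysOf m = ((List.range 7).filter (fun i => m.getD i false)).map (fun (i : Nat) => (i : Int)) := by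
  rw [daysOf]
  induction (List.range 7) with
  | nil => rfl
  | cons i l ih =>
    cases h : m.getD i false with
    | true => simp only [List.filterMap_cons, List.filter_cons, h, if_true, List.map_cons, ih]
    | false =>
      simp only [List.filterMap_cons, List.filter_cons, h, ih]
      rw [if_neg (by simp), if_neg (by simp)]

theorem daysOf_chain (m : List Bool) : (daysOf m).Pairwise (· < ·) := by
  rw [daysOf_eq_map_filter, List.pairwise_map]
  have h := List.Pairwise.sublist (List.filter_sublist (p := fun i => m.getD i false) (l := List.range 7)) (List.pairwise_lt_range (n := 7))
  exact h.imp (fun hab => by exact_mod_cast hab)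

theorem mem_daysOf (m : List Bool) (x : Int) :
    x ∈ daysOf m ↔ ∃ i : Nat, i < 7 ∧ x = (i : Int) ∧ m.getD i false = true := by
  rw [daysOf_eq_map_filter]
  simp only [List.mem_map, List.mem_filter, List.mem_range]
  constructor
  · rintro ⟨i, ⟨hi, hm⟩, rfl⟩; exact ⟨i, hi, rfl, hm⟩
  · rintro ⟨i, hi, rfl, hm⟩; exact ⟨i, ⟨hi, hm⟩, rfl⟩

-- the two sides agree as a function of the mask: 128 cases, by decide
theorem mask_cases (b0 b1 b2 b3 b4 b5 b6 : Bool) :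
    (let present : List Bool := [b0, b1, b2, b3, b4, b5, b6]
     if present.contains true = false then (7 : Int)
     else
       let first : Int := ((PySem.List.index? present true).getD 0 : Nat)
       let res : Int × Int :=
         (PySem.List.pyRange (first + 1) (first + 8) 1).foldl
           (fun st i =>
             if PySem.List.pyGetD present (PySem.Int.mod i 7) false then
               (max st.1 (i - st.2), i)
             else st)
           (0, first)
       res.1) =
    (match daysOf [b0, b1, b2, b3, b4, b5, b6] with
     | [] => (7 : Int)
     | a :: t => mgap a a t) := by
  revert b0 b1 b2 b3 b4 b5 b6
  decide


-- A's gap loop over the sorted list computes mgap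
theorem A_core (c : Int) (t : List Int) :
    (PySem.List.max?
      ((PySem.List.pyRange 0 (PySem.List.len (c :: t)) 1).foldl
        (fun huecos i =>
          if i < PySem.List.len (c :: t) - 1 then
            huecos ++ [PySem.List.pyGetD (c :: t) (i + 1) 0 - PySem.List.pyGetD (c :: t) i 0]
          else
            huecos ++ [7 - PySem.List.pyGetD (c :: t) i 0 + PySem.List.pyGetD (c :: t) 0 0]) [])
      (fun x => x)).getD 0 = mgap c c t := by
  have hcongr := PySem.List.foldl_congr_mem
    (l := PySem.List.pyRange 0 (PySem.List.len (c :: t)) 1) (init := ([] : List Int))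
    (f := fun huecos i =>
      if i < PySem.List.len (c :: t) - 1 then
        huecos ++ [PySem.List.pyGetD (c :: t) (i + 1) 0 - PySem.List.pyGetD (c :: t) i 0]
      else
        huecos ++ [7 - PySem.List.pyGetD (c :: t) i 0 + PySem.List.pyGetD (c :: t) 0 0])
    (g := fun huecos i => huecos ++
      [if i < PySem.List.len (c :: t) - 1 then
        PySem.List.pyGetD (c :: t) (i + 1) 0 - PySem.List.pyGetD (c :: t) i 0
      else
        7 - PySem.List.pyGetD (c :: t) i 0 + PySem.List.pyGetD (c :: t) 0 0])
    (fun acc x _ => by dsimp only; split <;> rfl)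
  rw [hcongr]
  rw [PySem.List.foldl_append_singleton_eq_map, List.nil_append]
  rw [PySem.List.len_eq, PySem.List.pyRange_zero_nat, List.map_map]
  have hmap : ((List.range (c :: t).length).map
      ((fun i : Int =>
        if i < ((c :: t).length : Int) - 1 then
          PySem.List.pyGetD (c :: t) (i + 1) 0 - PySem.List.pyGetD (c :: t) i 0
        else
          7 - PySem.List.pyGetD (c :: t) i 0 + PySem.List.pyGetD (c :: t) 0 0) ∘
        (fun k : Nat => (k : Int)))) = hueList c c t := by
    rw [← hueList_eq t c c]
    refine List.map_congr_left (fun k hk => ?_)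
    simp only [List.mem_range] at hk
    simp only [Function.comp_apply]
    have hget1 : PySem.List.pyGetD (c :: t) ((k : Int) + 1) 0 = (c :: t).getD (k + 1) 0 := by
      rw [show ((k : Int) + 1) = (((k + 1 : Nat)) : Int) by push_cast; ring,
        PySem.List.pyGetD_natCast]
    have hget2 : PySem.List.pyGetD (c :: t) (k : Int) 0 = (c :: t).getD k 0 :=
      PySem.List.pyGetD_natCast _ _ _
    have hget0 : PySem.List.pyGetD (c :: t) 0 0 = c := PySem.List.pyGetD_zero_cons _ _ _
    by_cases hc2 : ((k : Nat) : Int) < (((c :: t).length : Nat) : Int) - 1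
    · rw [if_pos hc2, if_pos hc2, hget1, hget2]
    · rw [if_neg hc2, if_neg hc2, hget2, hget0]
  rw [hmap]
  cases t with
  | nil => rfl
  | cons b u =>
    rw [show hueList c c (b :: u) = (b - c) :: hueList c b u from rfl, PySem.List.max?_id_cons]
    simp only [Option.getD_some]
    rw [mgap_foldl]
    rfl

theorem A_side (s : String) : calcular_lead_time_real s =
    (match daysOf (pvMask (pvParse s)) with
     | [] => (7 : Int)
     | a :: t => mgap a a t) := by
  have hr := pvParse_range s
  simp only [calcular_lead_time_real]
  rw [show ((PySem.Str.split? s ",").getD []).filterMap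
      (fun d => PySem.Dict.get? mapaDias (PySem.Str.lower (PySem.Str.strip d))) = pvParse s from rfl]
  by_cases hS : pvParse s = []
  · rw [if_pos hS, hS]
    rfl
  · rw [if_neg hS]
    obtain ⟨c, t, hct⟩ : ∃ c t, PySem.List.sorted (pvParse s) (fun x => x) false = c :: t := by
      cases h : PySem.List.sorted (pvParse s) (fun x => x) false with
      | nil => exact absurd ((PySem.List.sorted_eq_nil_iff _ _ _).mp h) hS
      | cons c t => exact ⟨c, t, rfl⟩
    rw [hct, A_core c t]
    have hperm := PySem.List.sorted_perm (pvParse s) (fun x => x) false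
    rw [hct] at hperm
    have hmem : ∀ x : Int, x ∈ c :: t ↔ x ∈ pvParse s := fun x => hperm.mem_iff
    have hpair : (c :: t).Pairwise (· ≤ ·) := by
      have h := PySem.List.sorted_pairwise (pvParse s) (fun x => x)
      rw [hct] at h
      exact h
    rcases List.pairwise_cons.mp hpair with ⟨hct_lo, htpair⟩
    have hrange' : ∀ x ∈ c :: t, 0 ≤ x ∧ x < 7 := fun x hx => hr x ((hmem x).mp hx)
    have hc7 : 0 ≤ c ∧ c < 7 := hrange' c (by simp)
    have ht6 : ∀ x ∈ t, x ≤ 6 := fun x hx => by have := hrange' x (by simp [hx]); omega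
    rw [mgap_dedup t c c hc7.1 (by omega) ht6]
    have heq : daysOf (pvMask (pvParse s)) = c :: dedupAdj c t := by
      have h1 : (c :: dedupAdj c t).Pairwise (· < ·) := chain_dedupAdj t c htpair hct_lo
      have h2 := daysOf_chain (pvMask (pvParse s))
      have hmem2 : ∀ x, x ∈ daysOf (pvMask (pvParse s)) ↔ x ∈ c :: dedupAdj c t := by
        intro x
        rw [mem_daysOf]
        constructor
        · rintro ⟨i, hi, rfl, hm⟩
          rw [pvMask_getD _ hr i hi] at hm
          have hxS : (i : Int) ∈ pvParse s := by simpa using hm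
          have hx : (i : Int) ∈ c :: t := (hmem _).mpr hxS
          rcases List.mem_cons.mp hx with h | h
          · simp [h]
          · by_cases hxc : (i : Int) = c
            · simp [hxc]
            · exact List.mem_cons_of_mem _ ((mem_dedupAdj t c htpair hct_lo _).mpr ⟨h, hxc⟩)
        · intro hx
          have hxct : x ∈ c :: t := by
            rcases List.mem_cons.mp hx with rfl | h
            · simp
            · exact List.mem_cons_of_mem _ (mem_dedupAdj_subset t c x h)
          have hxS := (hmem x).mp hxct
          have hx7 := hr x hxS
          refine ⟨x.toNat, by omega, by omega, ?_⟩
          rw [pvMask_getD _ hr x.toNat (by omega)]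
          simp only [decide_eq_true_eq]
          rwa [show ((x.toNat : Nat) : Int) = x by omega]
      have hnd1 : (daysOf (pvMask (pvParse s))).Nodup := h2.imp (fun h => ne_of_lt h)
      have hnd2 : (c :: dedupAdj c t).Nodup := h1.imp (fun h => ne_of_lt h)
      have hperm2 : (daysOf (pvMask (pvParse s))).Perm (c :: dedupAdj c t) :=
        (List.perm_ext_iff_of_nodup hnd1 hnd2).mpr hmem2
      exact List.Perm.eq_of_pairwise (fun a b _ _ hab hba => le_antisymm hab hba)
        (h2.imp (fun h => le_of_lt h)) (h1.imp (fun h => le_of_lt h)) hperm2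
    rw [heq]

theorem list7 (l : List Bool) (h : l.length = 7) :
    ∃ b0 b1 b2 b3 b4 b5 b6, l = [b0, b1, b2, b3, b4, b5, b6] := by
  match l, h with
  | [b0, b1, b2, b3, b4, b5, b6], _ => exact ⟨b0, b1, b2, b3, b4, b5, b6, rfl⟩

theorem B_side (s : String) : calcular_lead_time_real_alt s =
    (match daysOf (pvMask (pvParse s)) with
     | [] => (7 : Int)
     | a :: t => mgap a a t) := by
  simp only [calcular_lead_time_real_alt]
  rw [pvMask_eq s]
  obtain ⟨b0, b1, b2, b3, b4, b5, b6, hm⟩ := list7 (pvMask (pvParse s)) (pvMask_length _)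
  rw [hm]
  exact mask_cases b0 b1 b2 b3 b4 b5 b6

-- ===== VERDICT (by name: the statement is the Claim_ definition above) =====
theorem calcular_lead_time_real_spec : Claim_equal_calcular_lead_time_real := by
  intro dias_str _
  show calcular_lead_time_real dias_str = calcular_lead_time_real_alt dias_str
  rw [A_side, B_side]
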